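-- pv_equiv track=rewrite | github.com/chaeyoooo/coding-test | 프로그래머스/1/132267. 콜라 문제/콜라 문제.py | solution
-- ===== SOURCE A (Python) =====
-- def solution(a, b, n):
--     result = 0
--     answer = 0 # a : 마트에 주어야하는 병의 수 , b : a개 가져다주면 마트가 주는 콜라 병의 수
--     while n >= a:
--         # k = n // a # 20 // 3 : 6
--         k = n // a
--         n = n - ( k * a) + (k * b) #내가 가지고 있는 갯수
--         answer += (k * b)
--     return answer
-- ===== SOURCE B (Python) =====
-- def solution(a, b, n):
--     # Closed form: each exchange trades (a - b) bottles for b cokes, and trading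
--     # is possible while at least a bottles remain, i.e. (n - b) // (a - b) exchanges in total.
--     if n < a:
--         return 0
--     return ((n - b) // (a - b)) * b
-- ===== Notes on version B (the rewrite author's own statement) =====
-- stated objective: simpler
-- what changed: Replaces A's while-loop simulation of repeated bottle exchanges by the one-line closed form ((n-b)//(a-b))*b.
-- outside the precondition, e.g. on solution(1, -15, 2): A returns -30, B returns -15
import Mathlib
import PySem

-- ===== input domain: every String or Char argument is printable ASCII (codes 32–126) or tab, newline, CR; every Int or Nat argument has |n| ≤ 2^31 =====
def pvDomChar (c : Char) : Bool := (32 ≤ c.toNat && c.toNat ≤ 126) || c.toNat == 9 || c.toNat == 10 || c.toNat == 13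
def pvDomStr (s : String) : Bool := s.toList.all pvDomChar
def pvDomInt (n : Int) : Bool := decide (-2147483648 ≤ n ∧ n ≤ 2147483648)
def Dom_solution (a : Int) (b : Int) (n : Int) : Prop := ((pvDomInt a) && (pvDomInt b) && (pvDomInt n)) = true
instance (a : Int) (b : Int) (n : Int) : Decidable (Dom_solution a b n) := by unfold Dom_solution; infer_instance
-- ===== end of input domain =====

-- B replaces A's while-loop exchange simulation by the closed form ((n-b)//(a-b))*b (simpler one-line formula).


-- ===== PORT A =====
-- A's while loop as well-founded recursion; the extra '0 < a ∧ b < a' in the dec-guard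
-- only makes the recursion total (on those excluded inputs Python A diverges or raises).
def solutionLoop (a : Int) (b : Int) (n : Int) (answer : Int) : Int :=
  if hcond : a ≤ n ∧ 0 < a ∧ b < a then
    let k := PySem.Int.floordiv n a
    solutionLoop a b (n - k * a + k * b) (answer + k * b)
  else answer
termination_by (n + 1 - a).toNat
decreasing_by
  obtain ⟨hn, ha, hab⟩ := hcond
  have hk : 1 ≤ PySem.Int.floordiv n a := by
    rw [PySem.Int.le_floordiv_iff_mul_le ha]; omega
  have h1 : 1 * (a - b) ≤ PySem.Int.floordiv n a * (a - b) :=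
    mul_le_mul_of_nonneg_right hk (by omega)
  have h2 : PySem.Int.floordiv n a * (a - b)
      = PySem.Int.floordiv n a * a - PySem.Int.floordiv n a * b := by ring
  omega

def solution (a : Int) (b : Int) (n : Int) : Int :=
  solutionLoop a b n 0

-- ===== PORT B =====
def solution_alt (a : Int) (b : Int) (n : Int) : Int :=
  if n < a then 0
  else PySem.Int.floordiv (n - b) (a - b) * b

-- ===== PRECONDITION & SPEC =====
-- Pre_ restricts to the puzzle's natural domain 0 < a, 0 ≤ b < a (plus the trivial n < a
-- case, where A returns 0 for any a, b): with n ≥ a, a negative reward b is outside the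
-- problem's domain (the puzzle guarantees 1 ≤ b < a) and there A's negative total is not
-- matched by B; with n ≥ a and (a ≤ 0 or a ≤ b) A diverges or raises ZeroDivisionError.
def Pre_solution (a : Int) (b : Int) (n : Int) : Prop :=
  (0 < a ∧ 0 ≤ b ∧ b < a) ∨ n < a
instance (a : Int) (b : Int) (n : Int) : Decidable (Pre_solution a b n) := by
  unfold Pre_solution; infer_instance

def pvWitness_solution : Int × Int × Int := (3, 1, 20)

def Spec_solution (a : Int) (b : Int) (n : Int) (out : Int) : Prop := out = solution_alt a b n
instance (a : Int) (b : Int) (n : Int) (out : Int) : Decidable (Spec_solution a b n out) := by unfold Spec_solution; infer_instance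

-- ===== CLAIM (what is proved, stated in full; the proofs are below) =====
def Claim_equal_solution : Prop := ∀ (a : Int) (b : Int) (n : Int), Dom_solution a b n → Pre_solution a b n → Spec_solution a b n (solution a b n)

-- ===== LEMMAS AND PROOFS =====

-- Loop invariant: on the good domain, the loop adds exactly the closed form of the current n.
theorem solutionLoop_closed (a b : Int) (ha : 0 < a) (hb : 0 ≤ b) (hab : b < a)
    (n answer : Int) : solutionLoop a b n answer = answer + solution_alt a b n := by
  by_cases hge : a ≤ n
  · unfold solutionLoop
    rw [dif_pos (show a ≤ n ∧ 0 < a ∧ b < a from ⟨hge, ha, hab⟩)]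
    set k := PySem.Int.floordiv n a with hkdef
    have hka : k = n / a := by rw [hkdef, PySem.Int.floordiv_eq_ediv_of_pos ha]
    have hk1 : 1 ≤ k := by
      rw [hkdef, PySem.Int.le_floordiv_iff_mul_le ha]; omega
    have hmod := Int.emod_nonneg n (by omega : a ≠ 0)
    have hmod2 := Int.emod_lt_of_pos n ha
    have hdiv := Int.emod_add_ediv n a
    have hdec : n - k * a + k * b < n := by
      have h1 : 1 * (a - b) ≤ k * (a - b) := mul_le_mul_of_nonneg_right hk1 (by omega)
      nlinarith
    rw [solutionLoop_closed a b ha hb hab (n - k * a + k * b) (answer + k * b)]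
    unfold solution_alt
    have hpos : 0 < a - b := by omega
    have hshift : PySem.Int.floordiv (n - k * a + k * b - b) (a - b)
        = PySem.Int.floordiv (n - b) (a - b) - k := by
      rw [PySem.Int.floordiv_eq_ediv_of_pos hpos,
          PySem.Int.floordiv_eq_ediv_of_pos hpos]
      have hrw : n - k * a + k * b - b = (n - b) + (-k) * (a - b) := by ring
      rw [hrw, Int.add_mul_ediv_right _ _ (by omega : a - b ≠ 0)]
      omega
    by_cases hlt : n - k * a + k * b < a
    · -- loop ends after this step: the remaining closed form is 0, i.e. floordiv (n-b) (a-b) = k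
      simp only [hlt, if_true, show ¬ n < a by omega, if_false]
      have hge0 : 0 ≤ n - k * a + k * b - b := by
        nlinarith [mul_le_mul_of_nonneg_right hk1 hb]
      have h0 : PySem.Int.floordiv (n - k * a + k * b - b) (a - b) = 0 := by
        rw [PySem.Int.floordiv_eq_ediv_of_pos hpos]
        exact Int.ediv_eq_zero_of_lt hge0 (by omega)
      have hk' : PySem.Int.floordiv (n - b) (a - b) = k := by omega
      rw [hk']; ring
    · simp only [hlt, if_false, show ¬ n < a by omega, if_false, hshift]
      ring
  · unfold solutionLoop
    simp only [show ¬(a ≤ n ∧ 0 < a ∧ b < a) by omega, dite_false]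
    unfold solution_alt
    simp only [show n < a by omega, if_true]
    ring
termination_by (n + 1 - a).toNat
decreasing_by
  have h2 : k * (a - b) = k * a - k * b := by ring
  have h3 : PySem.Int.floordiv n a * a = k * a := by rw [hkdef]
  have h4 : PySem.Int.floordiv n a * b = k * b := by rw [hkdef]
  omega

-- ===== VERDICT (by name: the statement is the Claim_ definition above) =====
theorem solution_spec : Claim_equal_solution := by
  intro a b n _ hpre
  unfold Spec_solution solution
  rcases hpre with ⟨ha, hb, hab⟩ | hlt
  · rw [solutionLoop_closed a b ha hb hab n 0, zero_add]
  · unfold solutionLoop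
    simp only [show ¬(a ≤ n ∧ 0 < a ∧ b < a) by omega, dite_false]
    unfold solution_alt
    simp [hlt]
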